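-- pv_equiv track=rewrite | github.com/nevilleajim/jpeg_image_compression | python_implementation/huffman_coding.py | encode_block
-- ===== SOURCE A (Python) =====
-- DC_LUMA_HUFF = {
--     0: ("00", 2), 1: ("010", 3), 2: ("011", 3), 3: ("100", 3),
--     4: ("101", 3), 5: ("110", 3), 6: ("1110", 4), 7: ("11110", 5),
--     8: ("111110", 6), 9: ("1111110", 7), 10: ("11111110", 8),
--     11: ("111111110", 9)
-- }
--
-- AC_LUMA_HUFF = {
--     (0, 0): ("1010", 4),
--     (0, 1): ("00", 2),
--     (0, 2): ("01", 2),
--     (1, 1): ("110", 3),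
--     (2, 1): ("11100", 5),
--     (15, 0): ("11111111001", 11)
-- }
--
-- def category(value):
--     """JPEG category = number of bits needed to store magnitude."""
--     if value == 0:
--         return 0
--     v = abs(value)
--     c = 0
--     while v > 0:
--         v >>= 1
--         c += 1
--     return c
--
-- def value_bits(value, size):
--     """Return JPEG value bits with sign encoding."""
--     if size == 0:
--         return ""
--
--     if value >= 0:
--         return format(value, f"0{size}b")
--
--     mask = (1 << size) - 1
--     return format(value & mask, f"0{size}b")
--
-- def encode_block(coeffs, last_dc):
--     """coeffs: kist 64 quantized value (zigzag ordered)
--     last_dc: previous DC coefficient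
--
--     Returns bitstring and new last_dc
--     """
--
--     bits = ""
--
--     dc = coeffs[0]
--     diff = dc - last_dc
--     cat = category(diff)
--     huff_code, _ = DC_LUMA_HUFF[cat]
--     bits += huff_code
--     bits += value_bits(diff, cat)
--
--     zero_run = 0
--
--     for ac in coeffs[1:]:
--         if ac == 0:
--             zero_run += 1
--
--             if zero_run == 16:
--                 huff, _ = AC_LUMA_HUFF[(15, 0)]
--                 bits += huff
--                 zero_run = 0
--
--         else:
--             size = category(ac)
--             key = (zero_run, size)
--
--             if key not in AC_LUMA_HUFF:
--                 raise ValueError(f"Huffman code for {key} not found.")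
--
--             huff, _ = AC_LUMA_HUFF[key]
--             bits += huff
--
--             bits += value_bits(ac, size)
--             zero_run = 0
--
--     if zero_run > 0:
--         huff, _ = AC_LUMA_HUFF[(0, 0)]
--         bits += huff
--     return bits, dc
-- ===== SOURCE B (Python) =====
-- DC_LUMA_HUFF = {
--     0: ("00", 2), 1: ("010", 3), 2: ("011", 3), 3: ("100", 3),
--     4: ("101", 3), 5: ("110", 3), 6: ("1110", 4), 7: ("11110", 5),
--     8: ("111110", 6), 9: ("1111110", 7), 10: ("11111110", 8),
--     11: ("111111110", 9)
-- }
--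
-- AC_LUMA_HUFF = {
--     (0, 0): ("1010", 4),
--     (0, 1): ("00", 2),
--     (0, 2): ("01", 2),
--     (1, 1): ("110", 3),
--     (2, 1): ("11100", 5),
--     (15, 0): ("11111111001", 11)
-- }
--
-- def category(value):
--     """JPEG category = number of bits needed to store magnitude."""
--     if value == 0:
--         return 0
--     v = abs(value)
--     c = 0
--     while v > 0:
--         v >>= 1
--         c += 1
--     return c
--
-- def value_bits(value, size):
--     """Return JPEG value bits with sign encoding."""
--     if size == 0:
--         return ""
--     if value >= 0:
--         return format(value, f"0{size}b")
--     mask = (1 << size) - 1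
--     return format(value & mask, f"0{size}b")
--
-- def encode_block(coeffs, last_dc):
--     """Gap-arithmetic variant: no zero_run counter at all. Extract the
--     positions of the nonzero AC coefficients, derive each zero-gap length
--     by index subtraction, and emit gap//16 ZRL codes by string repetition
--     plus the (gap%16, size) code; the trailing gap gets tail//16 ZRLs and
--     an EOB iff tail%16 > 0."""
--     dc = coeffs[0]
--     acs = coeffs[1:]
--     diff = dc - last_dc
--     cat = category(diff)
--     pieces = [DC_LUMA_HUFF[cat][0], value_bits(diff, cat)]
--
--     nz = [(i, v) for i, v in enumerate(acs) if v != 0]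
--     prev = 0
--     for i, ac in nz:
--         gap = i - prev
--         size = category(ac)
--         key = (gap % 16, size)
--         if key not in AC_LUMA_HUFF:
--             raise ValueError(f"Huffman code for {key} not found.")
--         pieces.append(AC_LUMA_HUFF[(15, 0)][0] * (gap // 16))
--         pieces.append(AC_LUMA_HUFF[key][0])
--         pieces.append(value_bits(ac, size))
--         prev = i + 1
--
--     tail = len(acs) - prev
--     pieces.append(AC_LUMA_HUFF[(15, 0)][0] * (tail // 16))
--     if tail % 16:
--         pieces.append(AC_LUMA_HUFF[(0, 0)][0])
--     return "".join(pieces), dc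
-- ===== Notes on version B (the rewrite author's own statement) =====
-- stated objective: alternative
-- what changed: B drops A's zero_run counter entirely: it extracts the nonzero AC positions by enumeration, computes each zero-gap length by index subtraction, and emits gap//16 ZRL codes by string repetition plus the (gap%16,size) code, with the trailing gap handled by tail//16 ZRLs and an EOB iff tail%16>0.
import Mathlib
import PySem

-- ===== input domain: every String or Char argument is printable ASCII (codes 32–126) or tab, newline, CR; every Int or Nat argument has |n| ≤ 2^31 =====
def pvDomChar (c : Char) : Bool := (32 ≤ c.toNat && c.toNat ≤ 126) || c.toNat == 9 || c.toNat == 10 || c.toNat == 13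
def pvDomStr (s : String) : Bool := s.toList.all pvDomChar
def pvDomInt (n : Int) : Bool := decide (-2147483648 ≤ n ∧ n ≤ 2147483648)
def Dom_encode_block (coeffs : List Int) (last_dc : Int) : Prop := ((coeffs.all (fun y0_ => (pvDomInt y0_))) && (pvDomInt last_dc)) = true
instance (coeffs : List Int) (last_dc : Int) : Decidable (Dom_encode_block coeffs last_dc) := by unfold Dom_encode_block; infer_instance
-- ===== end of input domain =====

-- B re-implements A's JPEG block Huffman encoder without A's zero_run counter:
-- it lists nonzero AC positions and derives runs by index/gap arithmetic (//16, %16);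
-- return values proved equal on all inputs where A returns.


-- ===== PORT A =====
-- shared module-level helpers of Source A (Source B uses the identical helpers)

-- category's while-loop: while v > 0: v >>= 1; c += 1
def catLoop : Nat → Nat
  | 0 => 0
  | n + 1 => catLoop ((n + 1) / 2) + 1
decreasing_by omega

def category (value : Int) : Int :=
  if value = 0 then 0 else (catLoop value.natAbs : Int)

-- format(n, f"0{size}b") for n ≥ 0: binary digits left-padded with '0' to width size
def padBin (n : Int) (size : Nat) : List Char :=
  let s := PySem.Int.toBinChars n
  List.replicate (size - s.length) '0' ++ s

def value_bits (value size : Int) : List Char :=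
  if size = 0 then []
  else if value ≥ 0 then padBin value size.toNat
  else padBin (PySem.Int.band value ((1 <<< size.toNat) - 1)) size.toNat

-- DC_LUMA_HUFF[c]: none = KeyError (codes kept as char lists, lengths as in the dict)
def dcHuff? (c : Int) : Option (List Char × Int) :=
  if c = 0 then some (['0','0'], 2)
  else if c = 1 then some (['0','1','0'], 3)
  else if c = 2 then some (['0','1','1'], 3)
  else if c = 3 then some (['1','0','0'], 3)
  else if c = 4 then some (['1','0','1'], 3)
  else if c = 5 then some (['1','1','0'], 3)
  else if c = 6 then some (['1','1','1','0'], 4)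
  else if c = 7 then some (['1','1','1','1','0'], 5)
  else if c = 8 then some (['1','1','1','1','1','0'], 6)
  else if c = 9 then some (['1','1','1','1','1','1','0'], 7)
  else if c = 10 then some (['1','1','1','1','1','1','1','0'], 8)
  else if c = 11 then some (['1','1','1','1','1','1','1','1','0'], 9)
  else none

-- AC_LUMA_HUFF[k]: none = key absent
def acHuff? (k : Int × Int) : Option (List Char × Int) :=
  if k = (0, 0) then some (['1','0','1','0'], 4)
  else if k = (0, 1) then some (['0','0'], 2)
  else if k = (0, 2) then some (['0','1'], 2)
  else if k = (1, 1) then some (['1','1','0'], 3)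
  else if k = (2, 1) then some (['1','1','1','0','0'], 5)
  else if k = (15, 0) then some (['1','1','1','1','1','1','1','1','0','0','1'], 11)
  else none

-- A's `for ac in coeffs[1:]` loop over state (bits, zero_run); none = ValueError
def aLoop : List Int → List Char → Int → Option (List Char × Int)
  | [], bits, zero_run => some (bits, zero_run)
  | ac :: rest, bits, zero_run =>
    if ac = 0 then
      if zero_run + 1 = 16 then
        match acHuff? (15, 0) with
        | some (huff, _) => aLoop rest (bits ++ huff) 0
        | none => none
      else aLoop rest bits (zero_run + 1)
    else
      let size := category ac
      match acHuff? (zero_run, size) with  -- `key not in AC_LUMA_HUFF: raise` then index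
      | none => none
      | some (huff, _) => aLoop rest (bits ++ huff ++ value_bits ac size) 0

def encode_block (coeffs : List Int) (last_dc : Int) : String × Int :=
  match coeffs with
  | [] => ("", 0)  -- coeffs[0] raises IndexError; excluded by Pre_
  | dc :: acs =>
    let diff := dc - last_dc
    let cat := category diff
    match dcHuff? cat with
    | none => ("", 0)  -- KeyError; excluded by Pre_
    | some (huff_code, _) =>
      let bits := huff_code ++ value_bits diff cat
      match aLoop acs bits 0 with
      | none => ("", 0)  -- ValueError; excluded by Pre_
      | some (bits, zero_run) =>
        let bits := if zero_run > 0 then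
            (match acHuff? (0, 0) with
             | some (huff, _) => bits ++ huff
             | none => bits)
          else bits
        (String.ofList bits, dc)

-- ===== PORT B =====
-- "11111111001" * n : Python string repetition of the ZRL code
def repZRL (n : Nat) : List Char :=
  (List.replicate n (['1','1','1','1','1','1','1','1','0','0','1'] : List Char)).flatten

-- enumerate(acs): [(i, v) for i, v in enumerate(acs)], offset-carrying
def enumFrom : Nat → List Int → List (Nat × Int)
  | _, [] => []
  | i, x :: xs => (i, x) :: enumFrom (i + 1) xs

-- nz = [(i, v) for i, v in enumerate(acs) if v != 0]
def nzPairs (acs : List Int) : List (Nat × Int) :=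
  (enumFrom 0 acs).filter (fun p => p.2 ≠ 0)

-- Source B's `for i, ac in nz` loop: emits the pieces for each nonzero, returns final prev;
-- none = ValueError on a missing (gap % 16, size) key
def bGo : List (Nat × Int) → Nat → Option (List Char × Nat)
  | [], prev => some ([], prev)
  | (i, ac) :: rest, prev =>
    let gap := i - prev
    let size := category ac
    match acHuff? (((gap % 16 : Nat) : Int), size) with
    | none => none
    | some (huff, _) =>
      (bGo rest (i + 1)).map
        (fun t => (repZRL (gap / 16) ++ huff ++ value_bits ac size ++ t.1, t.2))

def encode_block_alt (coeffs : List Int) (last_dc : Int) : String × Int :=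
  match coeffs with
  | [] => ("", 0)  -- coeffs[0] raises IndexError; excluded by Pre_
  | dc :: acs =>
    let diff := dc - last_dc
    let cat := category diff
    match dcHuff? cat with
    | none => ("", 0)
    | some (huff, _) =>
      match bGo (nzPairs acs) 0 with
      | none => ("", 0)
      | some (body, prev) =>
        let tail := acs.length - prev
        (String.ofList (huff ++ value_bits diff cat ++ body ++ repZRL (tail / 16) ++
            (if tail % 16 > 0 then ['1','0','1','0'] else [])), dc)

-- ===== PRECONDITION & SPEC =====
-- length of the zero run immediately preceding index i of the AC list
def zrunBefore (acs : List Int) (i : Nat) : Nat :=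
  ((acs.take i).reverse.takeWhile (· == 0)).length

-- Pre_ excludes exactly the inputs on which Python A raises: empty coeffs (IndexError),
-- a DC difference outside the 12 DC categories (KeyError), and a nonzero AC whose
-- (run mod 16, category) pair is missing from the tiny AC table (ValueError).
def Pre_encode_block (coeffs : List Int) (last_dc : Int) : Prop :=
  coeffs ≠ [] ∧
  (coeffs.headD 0 - last_dc).natAbs ≤ 2047 ∧
  ∀ i ∈ List.range coeffs.tail.length,
    coeffs.tail.getD i 0 ≠ 0 →
      ((zrunBefore coeffs.tail i % 16 = 0 ∧ 1 ≤ (coeffs.tail.getD i 0).natAbs ∧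
          (coeffs.tail.getD i 0).natAbs ≤ 3) ∨
       ((zrunBefore coeffs.tail i % 16 = 1 ∨ zrunBefore coeffs.tail i % 16 = 2) ∧
          (coeffs.tail.getD i 0).natAbs = 1))

instance (coeffs : List Int) (last_dc : Int) : Decidable (Pre_encode_block coeffs last_dc) := by
  unfold Pre_encode_block; infer_instance

def pvWitness_encode_block : List Int × Int := ([5, 1, 0, 0, 1, 0], 2)

def Spec_encode_block (coeffs : List Int) (last_dc : Int) (out : String × Int) : Prop := out = encode_block_alt coeffs last_dc
instance (coeffs : List Int) (last_dc : Int) (out : String × Int) : Decidable (Spec_encode_block coeffs last_dc out) := by unfold Spec_encode_block; infer_instance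

-- ===== CLAIM (what is proved, stated in full; the proofs are below) =====
def Claim_equal_encode_block : Prop := ∀ (coeffs : List Int) (last_dc : Int), Dom_encode_block coeffs last_dc → Pre_encode_block coeffs last_dc → Spec_encode_block coeffs last_dc (encode_block coeffs last_dc)

-- ===== LEMMAS AND PROOFS =====

-- the two fixed codes, named for the proofs
def zrlC : List Char := ['1','1','1','1','1','1','1','1','0','0','1']
def eobC : List Char := ['1','0','1','0']

-- B's trailing emission for total AC length n and final prev p
def tailPiece (n p : Nat) : List Char :=
  repZRL ((n - p) / 16) ++ (if (n - p) % 16 > 0 then eobC else [])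

theorem repZRL_zero : repZRL 0 = [] := rfl

theorem repZRL_succ (n : Nat) : repZRL (n + 1) = repZRL n ++ zrlC := by
  simp [repZRL, zrlC, List.replicate_succ']

-- Core correspondence: A's interleaved loop starting with g = base - prev zeros
-- already consumed (so its zero_run is g % 16 and g / 16 ZRL codes already sit in
-- the accumulator), followed by A's trailing-EOB rule, equals B's gap-arithmetic
-- emission over the nonzero positions plus B's trailing-tail arithmetic.
theorem loop_corr (l : List Int) (base prev : Nat) (acc : List Char) (h : prev ≤ base) :
    (aLoop l (acc ++ repZRL ((base - prev) / 16)) (((base - prev) % 16 : Nat) : Int)).map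
        (fun p => if p.2 > 0 then p.1 ++ eobC else p.1)
      = (bGo ((enumFrom base l).filter (fun q => q.2 ≠ 0)) prev).map
          (fun t => acc ++ (t.1 ++ tailPiece (base + l.length) t.2)) := by
  induction l generalizing base prev acc with
  | nil =>
    simp only [enumFrom, List.filter_nil, bGo, aLoop, Option.map_some, List.length_nil,
      Nat.add_zero, tailPiece]
    by_cases hz : (base - prev) % 16 > 0
    · have hpos : ((((base - prev) % 16 : Nat)) : Int) > 0 := by exact_mod_cast hz
      rw [if_pos hpos, if_pos hz]
      simp [List.append_assoc]
    · have h0 : (base - prev) % 16 = 0 := by omega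
      simp [h0]
  | cons ac rest ih =>
    have hL : base + (rest.length + 1) = base + 1 + rest.length := by omega
    by_cases h0 : ac = 0
    · -- zero coefficient: A counts, B skips (filtered out)
      subst h0
      by_cases h16 : (base - prev) % 16 = 15
      · -- zero_run hits 16: A emits a ZRL and resets
        have hcond : (((base - prev) % 16 : Nat) : Int) + 1 = 16 := by
          rw [h16]; norm_num
        have hih := ih (base + 1) prev acc (by omega)
        have hdiv : (base + 1 - prev) / 16 = (base - prev) / 16 + 1 := by omega
        have hmod : (base + 1 - prev) % 16 = 0 := by omega
        rw [hdiv, hmod] at hih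
        simp only [Nat.cast_zero, repZRL_succ] at hih
        simp only [aLoop, if_pos hcond, acHuff?]
        norm_num
        simpa [enumFrom, List.filter_cons, hL, zrlC, List.append_assoc] using hih
      · -- zero_run just increments
        have hcond : ¬ ((((base - prev) % 16 : Nat) : Int) + 1 = 16) := by
          have hlt : (base - prev) % 16 < 15 := by omega
          intro hc
          have : ((base - prev) % 16 : Nat) = 15 := by exact_mod_cast (by linarith : (((base - prev) % 16 : Nat) : Int) = 15)
          omega
        have hih := ih (base + 1) prev acc (by omega)
        have hdiv : (base + 1 - prev) / 16 = (base - prev) / 16 := by omega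
        have hmod : (base + 1 - prev) % 16 = (base - prev) % 16 + 1 := by omega
        rw [hdiv, hmod] at hih
        simp only [Nat.cast_add, Nat.cast_one] at hih
        simp only [aLoop, if_neg hcond]
        norm_num
        simpa [enumFrom, List.filter_cons, hL, List.append_assoc] using hih
    · -- nonzero coefficient at absolute index `base`, gap = base - prev
      simp only [enumFrom, List.filter_cons]
      rw [if_pos (by simp [h0] : decide (ac ≠ 0) = true)]
      simp only [bGo, aLoop, if_neg h0]
      cases hk : acHuff? ((((base - prev) % 16 : Nat) : Int), category ac) with
      | none => simp
      | some q =>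
        have hih := ih (base + 1) (base + 1)
            (acc ++ (repZRL ((base - prev) / 16) ++ (q.1 ++ value_bits ac (category ac))))
            (by omega)
        simp only [Nat.sub_self, Nat.zero_div, Nat.zero_mod, Nat.cast_zero, repZRL_zero,
          List.append_nil, List.append_assoc] at hih
        simp only [List.append_assoc]
        rw [hih]
        cases bGo ((enumFrom (base + 1) rest).filter (fun q => q.2 ≠ 0)) (base + 1) with
        | none => simp
        | some t => simp [hL, List.append_assoc]

theorem ports_agree (coeffs : List Int) (last_dc : Int) :
    encode_block coeffs last_dc = encode_block_alt coeffs last_dc := by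
  cases coeffs with
  | nil => rfl
  | cons dc acs =>
    simp only [encode_block, encode_block_alt]
    cases dcHuff? (category (dc - last_dc)) with
    | none => rfl
    | some q =>
      have h := loop_corr acs 0 0 (q.1 ++ value_bits (dc - last_dc) (category (dc - last_dc))) (le_refl 0)
      simp only [Nat.sub_self, Nat.zero_mod, Nat.cast_zero, Nat.zero_add, repZRL_zero,
        List.append_nil, Nat.zero_div] at h
      cases ha : aLoop acs (q.1 ++ value_bits (dc - last_dc) (category (dc - last_dc))) 0 with
      | none =>
        rw [ha] at h
        cases hb : bGo ((enumFrom 0 acs).filter (fun q => q.2 ≠ 0)) 0 <;>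
          rw [hb] at h <;> simp_all [nzPairs]
      | some p =>
        rw [ha] at h
        cases hb : bGo ((enumFrom 0 acs).filter (fun q => q.2 ≠ 0)) 0 with
        | none => rw [hb] at h; simp_all
        | some t =>
          obtain ⟨pb, pz⟩ := p
          obtain ⟨tb, tp⟩ := t
          rw [hb] at h
          simp only [Option.map_some, Option.some.injEq, tailPiece, eobC] at h
          simp only [nzPairs, ha, acHuff?]
          norm_num
          rw [h]
          simp only [ne_eq, decide_not] at hb
          simp only [hb]
          simp [List.append_assoc]

-- ===== VERDICT (by name: the statement is the Claim_ definition above) =====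
theorem encode_block_spec : Claim_equal_encode_block := by
  intro coeffs last_dc _ _
  unfold Spec_encode_block
  exact ports_agree coeffs last_dc
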